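-- pv_equiv track=rewrite | github.com/WoodyGuo/ycmd | ycmd/completers/dart/dart_completer.py | _ComputeLineAndColumn
-- ===== SOURCE A (Python) =====
-- def _ComputeLineAndColumn(contents, offset):
--     curline = 1
--     curcol = 1
--     for i, byte in enumerate(contents):
--         if i == offset:
--             return (curline, curcol)
--         curcol += 1
--         if byte == "\n":
--             curline += 1
--             curcol = 1
-- ===== SOURCE B (Python) =====
-- def _ComputeLineAndColumn(contents, offset):
--     if offset < 0 or offset >= len(contents):
--         return None
--     line = contents.count('\n', 0, offset) + 1
--     col = offset - contents.rfind('\n', 0, offset)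
--     return (line, col)
-- ===== Notes on version B (the rewrite author's own statement) =====
-- stated objective: idiomatic
-- what changed: Replaced the stateful enumerate loop maintaining (curline, curcol) with a guard plus two C-speed string scans: line = count of newlines before offset + 1, column = offset - rfind of the last preceding newline.
import Mathlib
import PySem

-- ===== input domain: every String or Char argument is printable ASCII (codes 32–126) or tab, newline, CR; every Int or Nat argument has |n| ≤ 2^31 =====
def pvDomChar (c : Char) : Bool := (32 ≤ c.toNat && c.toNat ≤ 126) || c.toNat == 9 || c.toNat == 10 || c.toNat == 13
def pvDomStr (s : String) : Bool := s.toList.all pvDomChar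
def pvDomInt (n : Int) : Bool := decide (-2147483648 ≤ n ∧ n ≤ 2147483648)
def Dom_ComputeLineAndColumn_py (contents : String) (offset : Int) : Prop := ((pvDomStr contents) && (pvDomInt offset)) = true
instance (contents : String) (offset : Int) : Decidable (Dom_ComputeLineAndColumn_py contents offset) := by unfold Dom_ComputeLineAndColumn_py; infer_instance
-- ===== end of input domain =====

-- B replaces A's stateful line/column accumulation loop with a range guard plus
-- two prefix scans: newline count for the line, last-newline position (rfind) for the column (idiomatic).


-- ===== PORT A =====
-- A's enumerate loop: index i, state (curline, curcol); Python returns None when the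
-- loop exhausts — those inputs are excluded by Pre_, the port returns (0, 0) there.
def loopA_ComputeLineAndColumn : List Char → Int → Int → Int → Int → Int × Int
  | [], _, _, _, _ => (0, 0)
  | c :: t, i, offset, curline, curcol =>
    if i = offset then (curline, curcol)
    else
      let curcol' := curcol + 1
      if c = '\n' then loopA_ComputeLineAndColumn t (i + 1) offset (curline + 1) 1
      else loopA_ComputeLineAndColumn t (i + 1) offset curline curcol'

def ComputeLineAndColumn_py (contents : String) (offset : Int) : Int × Int :=
  loopA_ComputeLineAndColumn contents.toList 0 offset 1 1

-- ===== PORT B =====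
-- hand port of str.count('\n', 0, offset) restricted to the prefix list (exact)
def cntNL : List Char → Int
  | [] => 0
  | c :: t => (if c = '\n' then 1 else 0) + cntNL t

-- hand port of str.rfind('\n', 0, offset) on the prefix list: last index of '\n', or -1 (exact)
def rfindNL : List Char → Int
  | [] => -1
  | c :: t =>
    let r := rfindNL t
    if r ≥ 0 then r + 1 else if c = '\n' then 0 else -1

def ComputeLineAndColumn_py_alt (contents : String) (offset : Int) : Int × Int :=
  if offset < 0 ∨ (contents.toList.length : Int) ≤ offset then (0, 0)
  else
    let pre := contents.toList.take offset.toNat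
    (cntNL pre + 1, offset - rfindNL pre)

-- ===== PRECONDITION & SPEC =====
-- Pre_ excludes exactly the out-of-range offsets on which Python A falls off the loop and
-- returns None, which is not a value of the declared pair type.
def Pre_ComputeLineAndColumn_py (contents : String) (offset : Int) : Prop :=
  0 ≤ offset ∧ offset < (contents.toList.length : Int)
instance (contents : String) (offset : Int) : Decidable (Pre_ComputeLineAndColumn_py contents offset) := by
  unfold Pre_ComputeLineAndColumn_py; infer_instance

def pvWitness_ComputeLineAndColumn_py : String × Int := ("ab\ncd", 4)

def Spec_ComputeLineAndColumn_py (contents : String) (offset : Int) (out : Int × Int) : Prop :=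
  out = ComputeLineAndColumn_py_alt contents offset
instance (contents : String) (offset : Int) (out : Int × Int) : Decidable (Spec_ComputeLineAndColumn_py contents offset out) := by
  unfold Spec_ComputeLineAndColumn_py; infer_instance

-- ===== CLAIM (what is proved, stated in full; the proofs are below) =====
def Claim_equal_ComputeLineAndColumn_py : Prop := ∀ (contents : String) (offset : Int), Dom_ComputeLineAndColumn_py contents offset → Pre_ComputeLineAndColumn_py contents offset → Spec_ComputeLineAndColumn_py contents offset (ComputeLineAndColumn_py contents offset)

-- ===== LEMMAS AND PROOFS =====

-- rfindNL is either a valid index (≥ 0) or the Python rfind sentinel -1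
theorem rfindNL_neg (p : List Char) (hr : ¬ rfindNL p ≥ 0) : rfindNL p = -1 := by
  induction p with
  | nil => simp [rfindNL]
  | cons a q ih =>
    simp only [rfindNL] at hr ⊢
    split_ifs at hr ⊢ with h1 h2 <;> omega

-- loop invariant: with n more steps to the target index, A's loop returns B's two scans
-- over the n-character prefix, adjusted by the incoming accumulator state.
theorem loopA_eq (l : List Char) : ∀ (n : Nat) (i cl cc : Int), (n : Int) < l.length →
    loopA_ComputeLineAndColumn l i (i + n) cl cc =
      (cl + cntNL (l.take n),
       if rfindNL (l.take n) ≥ 0 then (n : Int) - rfindNL (l.take n) else cc + n) := by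
  induction l with
  | nil => intro n i cl cc h; simp at h; omega
  | cons c t ih =>
    intro n i cl cc h
    cases n with
    | zero => simp [loopA_ComputeLineAndColumn, cntNL, rfindNL]
    | succ m =>
      have hm : (m : Int) < t.length := by simp at h; push_cast; omega
      simp only [List.take_succ_cons, cntNL, rfindNL, loopA_ComputeLineAndColumn]
      push_cast
      rw [if_neg (by omega : ¬ i = i + ((m : Int) + 1)),
          show i + ((m : Int) + 1) = (i + 1) + (m : Int) by ring]
      by_cases hc : c = '\n'
      · subst hc
        rw [if_pos rfl, ih m (i + 1) (cl + 1) 1 hm, Prod.mk.injEq]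
        refine ⟨by norm_num; ring, ?_⟩
        simp only [if_pos trivial]
        split_ifs <;> omega
      · rw [if_neg hc, ih m (i + 1) cl (cc + 1) hm, Prod.mk.injEq]
        refine ⟨by rw [if_neg hc]; ring, ?_⟩
        simp only [if_neg hc]
        split_ifs <;> omega

-- ===== VERDICT (by name: the statement is the Claim_ definition above) =====
theorem ComputeLineAndColumn_py_spec : Claim_equal_ComputeLineAndColumn_py := by
  intro contents offset _ hpre
  obtain ⟨h0, hlt⟩ := hpre
  unfold Spec_ComputeLineAndColumn_py ComputeLineAndColumn_py ComputeLineAndColumn_py_alt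
  rw [if_neg (by omega)]
  obtain ⟨n, rfl⟩ := Int.eq_ofNat_of_zero_le h0
  have hn : (n : Int) < contents.toList.length := hlt
  have key := loopA_eq contents.toList n 0 1 1 hn
  rw [show (0 : Int) + (n : Int) = (n : Int) by ring] at key
  rw [key, Int.toNat_natCast, Prod.mk.injEq]
  refine ⟨by ring, ?_⟩
  by_cases hr : rfindNL (contents.toList.take n) ≥ 0
  · rw [if_pos hr]
  · rw [if_neg hr, rfindNL_neg _ hr]; omega
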